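-- pv_equiv track=rewrite | github.com/beau32/amp | lib/utils.py | convert_csharp_date_format
-- ===== SOURCE A (Python) =====
-- FORMAT_CHANGES = (
--     ('yyyy', '%Y'), ('yyy', '%Y'), ('yy', '%y'), ('y', '%y'),
--     ('MMMM', '%B'), ('MMM', '%b'), ('MM', '%m'), ('M', '%m'),
--     ('dddd', '%A'), ('ddd', '%a'), ('dd', '%d'), ('d', '%d'),
--     ('HH', '%H'), ('H', '%H'), ('hh', '%I'), ('h', '%I'),
--     ('mm', '%M'), ('m', '%M'),
--     ('ss', '%S'), ('s', '%S'),
--     ('tt', '%p'), ('t', '%p'),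
--     ('zzz', '%z'), ('zz', '%z'), ('z', '%z'),
-- )
--
-- def convert_csharp_date_format(input_format):
--     """
--     Convert C# date format string to Python strftime format.
--
--     Args:
--         input_format: C# date format string (e.g., 'yyyy-MM-dd')
--
--     Returns:
--         String formatted for Python's strftime function.
--     """
--     output = ""
--     fmt = input_format
--
--     while fmt:
--         if fmt[0] == "'":
--             # Literal text enclosed in single quotes
--             apos = fmt.find("'", 1)
--             if apos == -1:
--                 apos = len(fmt)
--             output += fmt[1:apos].replace("%", "%%")
--             fmt = fmt[apos + 1:]
--         elif fmt[0] == "\\":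
--             # Escaped literal character
--             output += fmt[1:2].replace("%", "%%")
--             fmt = fmt[2:]
--         else:
--             # Match format tokens against known mappings
--             for in_token, out_token in FORMAT_CHANGES:
--                 if fmt.startswith(in_token):
--                     output += out_token
--                     fmt = fmt[len(in_token):]
--                     break
--             else:
--                 # No match found - emit character as literal
--                 output += fmt[0].replace("%", "%%")
--                 fmt = fmt[1:]
--
--     return output
-- ===== SOURCE B (Python) =====
-- # B: run-length tokenizer with a per-character code table instead of an ordered
-- # prefix scan over the FORMAT_CHANGES tuple.
--
-- # codes per repeatable format character, indexed by run length (clamped)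
-- RUNS = {
--     'y': ['%y', '%y', '%Y', '%Y'],
--     'M': ['%m', '%m', '%b', '%B'],
--     'd': ['%d', '%d', '%a', '%A'],
--     'H': ['%H', '%H'],
--     'h': ['%I', '%I'],
--     'm': ['%M', '%M'],
--     's': ['%S', '%S'],
--     't': ['%p', '%p'],
--     'z': ['%z', '%z', '%z'],
-- }
--
-- def convert_csharp_date_format(input_format):
--     s = input_format
--     n = len(s)
--     out = []
--     i = 0
--     while i < n:
--         c = s[i]
--         if c == "'":
--             j = s.find("'", i + 1)
--             if j == -1:
--                 j = n
--             out.append(s[i + 1:j].replace("%", "%%"))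
--             i = j + 1
--         elif c == "\\":
--             out.append(s[i + 1:i + 2].replace("%", "%%"))
--             i = i + 2
--         elif c in RUNS:
--             codes = RUNS[c]
--             k = i
--             while k < n and k - i < len(codes) and s[k] == c:
--                 k += 1
--             take = min(k - i, len(codes))
--             out.append(codes[take - 1])
--             i = i + take
--         else:
--             out.append("%%" if c == "%" else c)
--             i = i + 1
--     return "".join(out)
-- ===== Notes on version B (the rewrite author's own statement) =====
-- stated objective: faster
-- what changed: Replaces A's ordered startswith scan over the 25-entry FORMAT_CHANGES tuple (and repeated string slicing of the remaining format) with an index-based run-length tokenizer: count the run of the leading format character, clamp it, index a per-character code table, and join an output list.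
import Mathlib
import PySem

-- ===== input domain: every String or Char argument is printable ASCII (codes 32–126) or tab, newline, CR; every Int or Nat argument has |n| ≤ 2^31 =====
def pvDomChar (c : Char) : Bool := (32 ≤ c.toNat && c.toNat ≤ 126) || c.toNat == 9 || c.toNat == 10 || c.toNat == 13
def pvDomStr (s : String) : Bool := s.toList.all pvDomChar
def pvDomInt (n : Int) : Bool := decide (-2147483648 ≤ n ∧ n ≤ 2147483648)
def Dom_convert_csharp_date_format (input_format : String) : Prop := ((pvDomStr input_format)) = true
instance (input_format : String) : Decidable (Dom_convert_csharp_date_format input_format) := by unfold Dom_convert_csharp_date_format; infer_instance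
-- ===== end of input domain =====

-- B replaces A's ordered startswith scan over FORMAT_CHANGES with a run-length
-- tokenizer indexing a per-character code table (objective: alternative).

-- ===== PORT A =====

-- str.replace("%", "%%") on the character list
def replPct : List Char → List Char
  | [] => []
  | c :: t => if c = '%' then '%' :: '%' :: replPct t else c :: replPct t

def FORMAT_CHANGES : List (List Char × List Char) :=
  [ (['y','y','y','y'], ['%','Y']), (['y','y','y'], ['%','Y']), (['y','y'], ['%','y']), (['y'], ['%','y']),
    (['M','M','M','M'], ['%','B']), (['M','M','M'], ['%','b']), (['M','M'], ['%','m']), (['M'], ['%','m']),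
    (['d','d','d','d'], ['%','A']), (['d','d','d'], ['%','a']), (['d','d'], ['%','d']), (['d'], ['%','d']),
    (['H','H'], ['%','H']), (['H'], ['%','H']), (['h','h'], ['%','I']), (['h'], ['%','I']),
    (['m','m'], ['%','M']), (['m'], ['%','M']),
    (['s','s'], ['%','S']), (['s'], ['%','S']),
    (['t','t'], ['%','p']), (['t'], ['%','p']),
    (['z','z','z'], ['%','z']), (['z','z'], ['%','z']), (['z'], ['%','z']) ]

-- the for/break/else loop over FORMAT_CHANGES: first token that is a prefix
def matchTok : List (List Char × List Char) → List Char → Option (List Char × Nat)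
  | [], _ => none
  | (tok, out) :: rest, fmt =>
      if tok.isPrefixOf fmt then some (out, tok.length) else matchTok rest fmt

-- the while loop of A; fuel = |fmt| suffices since every step consumes ≥ 1 char
-- fmt[1:apos] = (fmt.drop 1).take (apos-1), fmt[a:] = fmt.drop a (nonneg in-range slices)
def goA : Nat → List Char → List Char
  | 0, _ => []
  | _ + 1, [] => []
  | fuel + 1, c :: rest =>
      let fmt := c :: rest
      if c = '\'' then
        -- apos = fmt.find("'", 1), -1 replaced by len(fmt)
        let apos := match rest.findIdx? (· == '\'') with
          | some k => 1 + k
          | none => fmt.length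
        replPct ((fmt.drop 1).take (apos - 1)) ++ goA fuel (fmt.drop (apos + 1))
      else if c = '\\' then
        replPct ((fmt.drop 1).take 1) ++ goA fuel (fmt.drop 2)
      else
        match matchTok FORMAT_CHANGES fmt with
        | some (out, len) => out ++ goA fuel (fmt.drop len)
        | none => replPct [c] ++ goA fuel rest

def convert_csharp_date_format (input_format : String) : String :=
  String.mk (goA input_format.toList.length input_format.toList)

-- ===== PORT B =====

-- the RUNS dict of Source B: strftime codes per format char, indexed by run length
def runCodes (c : Char) : Option (List (List Char)) :=
  if c = 'y' then some [['%','y'], ['%','y'], ['%','Y'], ['%','Y']]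
  else if c = 'M' then some [['%','m'], ['%','m'], ['%','b'], ['%','B']]
  else if c = 'd' then some [['%','d'], ['%','d'], ['%','a'], ['%','A']]
  else if c = 'H' then some [['%','H'], ['%','H']]
  else if c = 'h' then some [['%','I'], ['%','I']]
  else if c = 'm' then some [['%','M'], ['%','M']]
  else if c = 's' then some [['%','S'], ['%','S']]
  else if c = 't' then some [['%','p'], ['%','p']]
  else if c = 'z' then some [['%','z'], ['%','z'], ['%','z']]
  else none

-- Source B's inner while: k-i = run of c at position i, counted up to at most cap = len(codes)
def countCap (c : Char) : Nat → List Char → Nat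
  | 0, _ => 0
  | _ + 1, [] => 0
  | cap + 1, x :: t => if x = c then countCap c cap t + 1 else 0

-- the index-based while loop of Source B; fuel = n+1 suffices since i grows each step
def goB (s : List Char) : Nat → Nat → List Char
  | 0, _ => []
  | fuel + 1, i =>
      if h : i < s.length then
        let c := s.getD i ' '
        if c = '\'' then
          let j := match (s.drop (i + 1)).findIdx? (· == '\'') with
            | some k => i + 1 + k
            | none => s.length
          replPct ((s.drop (i + 1)).take (j - (i + 1))) ++ goB s fuel (j + 1)
        else if c = '\\' then
          replPct ((s.drop (i + 1)).take 1) ++ goB s fuel (i + 2)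
        else
          match runCodes c with
          | some codes =>
              let take := min (countCap c codes.length (s.drop i)) codes.length
              codes.getD (take - 1) [] ++ goB s fuel (i + take)
          | none => (if c = '%' then ['%','%'] else [c]) ++ goB s fuel (i + 1)
      else []

def convert_csharp_date_format_alt (input_format : String) : String :=
  String.mk (goB input_format.toList (input_format.toList.length + 1) 0)

-- ===== PRECONDITION & SPEC =====
def Spec_convert_csharp_date_format (input_format : String) (out : String) : Prop := out = convert_csharp_date_format_alt input_format
instance (input_format : String) (out : String) : Decidable (Spec_convert_csharp_date_format input_format out) := by unfold Spec_convert_csharp_date_format; infer_instance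

-- ===== CLAIM (what is proved, stated in full; the proofs are below) =====
def Claim_equal_convert_csharp_date_format : Prop := ∀ (input_format : String), Dom_convert_csharp_date_format input_format → Spec_convert_csharp_date_format input_format (convert_csharp_date_format input_format)

-- ===== LEMMAS AND PROOFS =====

-- uncapped run length, relating A's token matching to B's capped counter
def countRun (c : Char) : List Char → Nat
  | [] => 0
  | x :: t => if x = c then countRun c t + 1 else 0

lemma countCap_eq (c : Char) : ∀ (cap : Nat) (l : List Char),
    countCap c cap l = min (countRun c l) cap := by
  intro cap
  induction cap with
  | zero => intro l; simp [countCap]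
  | succ cap ih =>
    intro l
    cases l with
    | nil => simp [countCap, countRun]
    | cons x t =>
      by_cases hx : x = c
      · simp only [countCap, countRun, if_pos hx, ih t]
        omega
      · simp [countCap, countRun, hx]

-- descending token group for one format char: lengths |outs|, |outs|-1, …, 1
def descTokens (c : Char) : List (List Char) → List (List Char × List Char)
  | [] => []
  | o :: rest => (List.replicate (rest.length + 1) c, o) :: descTokens c rest

lemma format_changes_grouped :
    FORMAT_CHANGES =
      descTokens 'y' [['%','Y'], ['%','Y'], ['%','y'], ['%','y']] ++
      (descTokens 'M' [['%','B'], ['%','b'], ['%','m'], ['%','m']] ++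
      (descTokens 'd' [['%','A'], ['%','a'], ['%','d'], ['%','d']] ++
      (descTokens 'H' [['%','H'], ['%','H']] ++
      (descTokens 'h' [['%','I'], ['%','I']] ++
      (descTokens 'm' [['%','M'], ['%','M']] ++
      (descTokens 's' [['%','S'], ['%','S']] ++
      (descTokens 't' [['%','p'], ['%','p']] ++
      (descTokens 'z' [['%','z'], ['%','z'], ['%','z']] ++ ([] : List (List Char × List Char)))))))))) := by
  rfl

lemma isPrefixOf_replicate (k : Nat) (c : Char) :
    ∀ fmt : List Char, (List.replicate k c).isPrefixOf fmt = true ↔ k ≤ countRun c fmt := by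
  induction k with
  | zero => intro fmt; simp [List.isPrefixOf]
  | succ k ih =>
    intro fmt
    cases fmt with
    | nil => simp [List.isPrefixOf, List.replicate_succ, countRun]
    | cons x t =>
      have hpre : (List.replicate (k + 1) c).isPrefixOf (x :: t) =
          ((c == x) && (List.replicate k c).isPrefixOf t) := by
        simp [List.replicate_succ, List.isPrefixOf]
      by_cases hx : x = c
      · have hcr : countRun c (x :: t) = countRun c t + 1 := by simp [countRun, hx]
        have hcx : (c == x) = true := by simp [hx]
        rw [hpre, hcr, hcx]
        simp only [Bool.true_and]
        rw [ih t]; omega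
      · have hcr : countRun c (x :: t) = 0 := by simp [countRun, hx]
        have hcx : (c == x) = false := by
          simp only [beq_eq_false_iff_ne]; exact fun h => hx h.symm
        rw [hpre, hcr, hcx]
        simp

lemma matchTok_skip (outs : List (List Char)) (c' c : Char) (t : List Char)
    (h : c' ≠ c) (rest : List (List Char × List Char)) :
    matchTok (descTokens c' outs ++ rest) (c :: t) = matchTok rest (c :: t) := by
  induction outs with
  | nil => rfl
  | cons o os ih =>
    simp only [descTokens, List.cons_append, matchTok]
    have : (List.replicate (os.length + 1) c').isPrefixOf (c :: t) = false := by
      simp [List.replicate_succ, List.isPrefixOf, beq_eq_false_iff_ne, h]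
    rw [this]
    simpa using ih

lemma matchTok_desc (c : Char) (fmt : List Char) (hr : 1 ≤ countRun c fmt) :
    ∀ (outs : List (List Char)), outs ≠ [] →
      ∀ rest, matchTok (descTokens c outs ++ rest) fmt =
        some (outs.getD (outs.length - min (countRun c fmt) outs.length) [],
              min (countRun c fmt) outs.length) := by
  intro outs
  induction outs with
  | nil => intro h; exact absurd rfl h
  | cons o os ih =>
    intro _ rest
    set r := countRun c fmt with hrdef
    simp only [descTokens, List.cons_append, matchTok]
    by_cases hle : os.length + 1 ≤ r
    · rw [if_pos ((isPrefixOf_replicate (os.length + 1) c fmt).2 (by omega))]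
      have hmin : min r (os.length + 1) = os.length + 1 := by omega
      simp [List.length_replicate, hmin]
    · rw [if_neg (fun hc => absurd ((isPrefixOf_replicate (os.length + 1) c fmt).1 hc) (by omega))]
      cases os with
      | nil => simp at hle; omega
      | cons o2 os2 =>
        rw [ih (by simp) rest]
        have hrle : r ≤ (o2 :: os2).length := by simp at hle ⊢; omega
        have h1 : min r ((o2 :: os2).length) = r := by omega
        have h2 : min r ((o :: o2 :: os2).length) = r := by simp at hle ⊢; omega
        rw [h1, h2]
        congr 1
        have : (o :: o2 :: os2).length - r = ((o2 :: os2).length - r) + 1 := by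
          simp at hrle ⊢; omega
        rw [this]
        rfl

lemma getD_reverse_idx (l : List (List Char)) (m : Nat) (h1 : 1 ≤ m) (h2 : m ≤ l.length) :
    l.reverse.getD (m - 1) [] = l.getD (l.length - m) [] := by
  have hlt : m - 1 < l.reverse.length := by simp; omega
  have hlt2 : l.length - m < l.length := by omega
  rw [List.getD_eq_getElem _ _ hlt, List.getD_eq_getElem _ _ hlt2,
    List.getElem_reverse]
  congr 1
  omega

lemma matchTok_group (c : Char) (t : List Char) (outs : List (List Char))
    (hne : outs ≠ []) (rest : List (List Char × List Char)) :
    matchTok (descTokens c outs ++ rest) (c :: t) =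
      some (outs.reverse.getD (min (countRun c (c :: t)) outs.length - 1) [],
            min (countRun c (c :: t)) outs.length) := by
  have hr : 1 ≤ countRun c (c :: t) := by simp [countRun]
  rw [matchTok_desc c (c :: t) hr outs hne rest]
  have hL : 1 ≤ outs.length := by cases outs <;> simp_all
  have hm1 : 1 ≤ min (countRun c (c :: t)) outs.length := by omega
  have hm2 : min (countRun c (c :: t)) outs.length ≤ outs.length := by omega
  rw [getD_reverse_idx outs _ hm1 hm2]

lemma tokenStep_none (c : Char) (t : List Char) (h : runCodes c = none) :
    matchTok FORMAT_CHANGES (c :: t) = none := by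
  unfold runCodes at h
  split_ifs at h
  rw [format_changes_grouped,
    matchTok_skip _ _ _ _ (by rename_i h1 _ _ _ _ _ _ _ _; exact fun hc => h1 hc.symm),
    matchTok_skip _ _ _ _ (by rename_i h1 _ _ _ _ _ _ _; exact fun hc => h1 hc.symm),
    matchTok_skip _ _ _ _ (by rename_i h1 _ _ _ _ _ _; exact fun hc => h1 hc.symm),
    matchTok_skip _ _ _ _ (by rename_i h1 _ _ _ _ _; exact fun hc => h1 hc.symm),
    matchTok_skip _ _ _ _ (by rename_i h1 _ _ _ _; exact fun hc => h1 hc.symm),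
    matchTok_skip _ _ _ _ (by rename_i h1 _ _ _; exact fun hc => h1 hc.symm),
    matchTok_skip _ _ _ _ (by rename_i h1 _ _; exact fun hc => h1 hc.symm),
    matchTok_skip _ _ _ _ (by rename_i h1 _; exact fun hc => h1 hc.symm),
    matchTok_skip _ _ _ _ (by rename_i h1; exact fun hc => h1 hc.symm)]
  rfl

lemma tokenStep_some (c : Char) (t : List Char) (codes : List (List Char))
    (h : runCodes c = some codes) :
    matchTok FORMAT_CHANGES (c :: t) =
      some (codes.getD (min (countRun c (c :: t)) codes.length - 1) [],
            min (countRun c (c :: t)) codes.length) := by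
  unfold runCodes at h
  rw [format_changes_grouped]
  split_ifs at h with h1 h2 h3 h4 h5 h6 h7 h8 h9 <;>
    first
    | (subst h1; injection h with h; subst h
       exact matchTok_group _ t _ (by simp) _)
    | (subst h2; injection h with h; subst h
       rw [matchTok_skip _ _ _ _ (by decide)]
       exact matchTok_group _ t _ (by simp) _)
    | (subst h3; injection h with h; subst h
       rw [matchTok_skip _ _ _ _ (by decide), matchTok_skip _ _ _ _ (by decide)]
       exact matchTok_group _ t _ (by simp) _)
    | (subst h4; injection h with h; subst h
       rw [matchTok_skip _ _ _ _ (by decide), matchTok_skip _ _ _ _ (by decide),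
         matchTok_skip _ _ _ _ (by decide)]
       exact matchTok_group _ t _ (by simp) _)
    | (subst h5; injection h with h; subst h
       rw [matchTok_skip _ _ _ _ (by decide), matchTok_skip _ _ _ _ (by decide),
         matchTok_skip _ _ _ _ (by decide), matchTok_skip _ _ _ _ (by decide)]
       exact matchTok_group _ t _ (by simp) _)
    | (subst h6; injection h with h; subst h
       rw [matchTok_skip _ _ _ _ (by decide), matchTok_skip _ _ _ _ (by decide),
         matchTok_skip _ _ _ _ (by decide), matchTok_skip _ _ _ _ (by decide),
         matchTok_skip _ _ _ _ (by decide)]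
       exact matchTok_group _ t _ (by simp) _)
    | (subst h7; injection h with h; subst h
       rw [matchTok_skip _ _ _ _ (by decide), matchTok_skip _ _ _ _ (by decide),
         matchTok_skip _ _ _ _ (by decide), matchTok_skip _ _ _ _ (by decide),
         matchTok_skip _ _ _ _ (by decide), matchTok_skip _ _ _ _ (by decide)]
       exact matchTok_group _ t _ (by simp) _)
    | (subst h8; injection h with h; subst h
       rw [matchTok_skip _ _ _ _ (by decide), matchTok_skip _ _ _ _ (by decide),
         matchTok_skip _ _ _ _ (by decide), matchTok_skip _ _ _ _ (by decide),
         matchTok_skip _ _ _ _ (by decide), matchTok_skip _ _ _ _ (by decide),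
         matchTok_skip _ _ _ _ (by decide)]
       exact matchTok_group _ t _ (by simp) _)
    | (subst h9; injection h with h; subst h
       rw [matchTok_skip _ _ _ _ (by decide), matchTok_skip _ _ _ _ (by decide),
         matchTok_skip _ _ _ _ (by decide), matchTok_skip _ _ _ _ (by decide),
         matchTok_skip _ _ _ _ (by decide), matchTok_skip _ _ _ _ (by decide),
         matchTok_skip _ _ _ _ (by decide), matchTok_skip _ _ _ _ (by decide)]
       exact matchTok_group _ t _ (by simp) _)

lemma runCodes_pos (c : Char) (codes : List (List Char)) (h : runCodes c = some codes) :
    1 ≤ codes.length := by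
  unfold runCodes at h
  split_ifs at h <;> (injection h with h; subst h; simp)

lemma goA_nil (f : Nat) : goA f [] = [] := by cases f <;> rfl

lemma goB_ge (s : List Char) (f i : Nat) (h : s.length ≤ i) : goB s f i = [] := by
  cases f with
  | zero => rfl
  | succ f => unfold goB; rw [dif_neg (by omega)]

lemma goAB (s : List Char) :
    ∀ (f1 : Nat) (f2 i : Nat), s.length - i ≤ f1 → s.length - i ≤ f2 →
      goA f1 (s.drop i) = goB s f2 i := by
  intro f1
  induction f1 with
  | zero =>
    intro f2 i h1 _
    have : s.length ≤ i := by omega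
    rw [List.drop_eq_nil_of_le this, goA_nil, goB_ge s f2 i this]
  | succ f1 ih =>
    intro f2 i h1 h2
    by_cases hi : i < s.length
    · obtain ⟨g2, rfl⟩ : ∃ g, f2 = g + 1 := ⟨f2 - 1, by omega⟩
      have hcons : s.drop i = s[i] :: s.drop (i + 1) := List.drop_eq_getElem_cons hi
      have hgetD : s.getD i ' ' = s[i] := List.getD_eq_getElem s ' ' hi
      rw [hcons]
      unfold goA goB
      rw [dif_pos hi]
      simp only [hgetD]
      have hdd : ∀ m : Nat, (s.drop i).drop m = s.drop (i + m) := by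
        intro m; rw [List.drop_drop]
      by_cases hq : s[i] = '\''
      · rw [if_pos hq, if_pos hq]
        simp only [List.drop_one, List.tail_cons]
        rw [← hcons]
        cases hfi : (s.drop (i + 1)).findIdx? (· == '\'') with
        | some k =>
          have hk : k < (s.drop (i + 1)).length := by
            have := List.findIdx?_eq_some_iff_findIdx_eq.mp hfi
            exact this.1
          simp only [hfi]
          have e1 : 1 + k - 1 = k := by omega
          have e2 : i + 1 + k - (i + 1) = k := by omega
          simp only [e1, e2]
          congr 1
          rw [hdd (1 + k + 1)]
          have : i + (1 + k + 1) = i + 1 + k + 1 := by ring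
          rw [this]
          apply ih
          · simp at hk; omega
          · simp at hk; omega
        | none =>
          simp only [hfi]
          have hlen : (s.drop i).length = s.length - i := by simp
          simp only [hlen]
          have e1 : s.length - i - 1 = s.length - (i + 1) := by omega
          rw [e1]
          congr 1
          rw [hdd (s.length - i + 1), List.drop_eq_nil_of_le (by omega), goA_nil,
            goB_ge s g2 _ (by omega)]
      · rw [if_neg hq, if_neg hq]
        by_cases hb : s[i] = '\\'
        · rw [if_pos hb, if_pos hb]
          simp only [List.drop_one, List.tail_cons]
          congr 1
          rw [← hcons, hdd 2]
          apply ih <;> omega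
        · rw [if_neg hb, if_neg hb]
          cases hrc : runCodes s[i] with
          | none =>
            rw [tokenStep_none _ _ hrc]
            simp only [replPct]
            congr 1
            apply ih <;> omega
          | some codes =>
            rw [tokenStep_some _ _ codes hrc]
            simp only [← hcons]
            rw [countCap_eq s[i] codes.length (s.drop i)]
            have hmm : min (min (countRun s[i] (s.drop i)) codes.length) codes.length
                = min (countRun s[i] (s.drop i)) codes.length := by omega
            rw [hmm]
            set m := min (countRun s[i] (s.drop i)) codes.length with hm
            have hr1 : 1 ≤ countRun s[i] (s.drop i) := by
              rw [hcons]; simp [countRun]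
            have hm1 : 1 ≤ m := by
              have := runCodes_pos _ _ hrc; omega
            congr 1
            rw [hdd m]
            apply ih <;> omega
    · have hle : s.length ≤ i := by omega
      rw [List.drop_eq_nil_of_le hle, goA_nil, goB_ge s f2 i hle]

-- ===== VERDICT (by name: the statement is the Claim_ definition above) =====
theorem convert_csharp_date_format_spec : Claim_equal_convert_csharp_date_format := by
  intro input_format _
  unfold Spec_convert_csharp_date_format convert_csharp_date_format convert_csharp_date_format_alt
  congr 1
  have := goAB input_format.toList input_format.toList.length
    (input_format.toList.length + 1) 0 (by omega) (by omega)
  simpa using this
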